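-- pv_equiv track=rewrite | github.com/mnaeemraj/alzheimer_models | backend/main.py | detect_backbone_from_state_dict
-- ===== SOURCE A (Python) =====
-- def detect_backbone_from_state_dict(sd_keys):
--     keys = list(sd_keys)
--     if any("deit.encoder" in k or "transformer" in k for k in keys):
--         return "vit"
--     if any("features.denseblock" in k for k in keys):
--         return "densenet"
--     if any("features.0.weight" in k for k in keys):
--         return "efficientnet"
--     if any("classifier.6.weight" in k for k in keys):
--         return "vgg"
--     return "ensemble"
-- ===== SOURCE B (Python) =====
-- def detect_backbone_from_state_dict(sd_keys):
--     has_vit = has_densenet = has_efficientnet = has_vgg = False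
--     for k in sd_keys:
--         has_vit = has_vit or "deit.encoder" in k or "transformer" in k
--         has_densenet = has_densenet or "features.denseblock" in k
--         has_efficientnet = has_efficientnet or "features.0.weight" in k
--         has_vgg = has_vgg or "classifier.6.weight" in k
--     if has_vit:
--         return "vit"
--     if has_densenet:
--         return "densenet"
--     if has_efficientnet:
--         return "efficientnet"
--     if has_vgg:
--         return "vgg"
--     return "ensemble"
-- ===== Notes on version B (the rewrite author's own statement) =====
-- stated objective: faster
-- what changed: Replaces four separate short-circuiting any() scans over the key list with a single pass that accumulates four boolean flags, then decides the label in priority order.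
import Mathlib
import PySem

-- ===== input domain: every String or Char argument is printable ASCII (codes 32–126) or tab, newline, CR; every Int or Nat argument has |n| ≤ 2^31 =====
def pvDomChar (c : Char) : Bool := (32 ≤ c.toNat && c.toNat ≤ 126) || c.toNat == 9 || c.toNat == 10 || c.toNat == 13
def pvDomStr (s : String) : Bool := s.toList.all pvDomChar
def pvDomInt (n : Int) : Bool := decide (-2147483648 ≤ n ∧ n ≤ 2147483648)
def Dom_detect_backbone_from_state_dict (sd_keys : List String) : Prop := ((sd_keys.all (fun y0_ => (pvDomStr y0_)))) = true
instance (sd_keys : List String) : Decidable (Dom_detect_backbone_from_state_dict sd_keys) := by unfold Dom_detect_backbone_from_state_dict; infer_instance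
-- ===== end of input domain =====

-- B replaces A's four short-circuiting any-scans with one pass accumulating four flags; same labels, same priority.
-- ===== PORT A =====
def detect_backbone_from_state_dict (sd_keys : List String) : String :=
  let keys := sd_keys
  if keys.any (fun k => PySem.Str.isIn "deit.encoder" k || PySem.Str.isIn "transformer" k) then "vit"
  else if keys.any (fun k => PySem.Str.isIn "features.denseblock" k) then "densenet"
  else if keys.any (fun k => PySem.Str.isIn "features.0.weight" k) then "efficientnet"
  else if keys.any (fun k => PySem.Str.isIn "classifier.6.weight" k) then "vgg"
  else "ensemble"

-- ===== PORT B =====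
def detect_backbone_from_state_dict_alt (sd_keys : List String) : String :=
  let st := sd_keys.foldl
    (fun (f : Bool × Bool × Bool × Bool) k =>
      (f.1 || PySem.Str.isIn "deit.encoder" k || PySem.Str.isIn "transformer" k,
       f.2.1 || PySem.Str.isIn "features.denseblock" k,
       f.2.2.1 || PySem.Str.isIn "features.0.weight" k,
       f.2.2.2 || PySem.Str.isIn "classifier.6.weight" k))
    (false, false, false, false)
  if st.1 then "vit"
  else if st.2.1 then "densenet"
  else if st.2.2.1 then "efficientnet"
  else if st.2.2.2 then "vgg"
  else "ensemble"

-- ===== PRECONDITION & SPEC =====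
def Spec_detect_backbone_from_state_dict (sd_keys : List String) (out : String) : Prop := out = detect_backbone_from_state_dict_alt sd_keys
instance (sd_keys : List String) (out : String) : Decidable (Spec_detect_backbone_from_state_dict sd_keys out) := by unfold Spec_detect_backbone_from_state_dict; infer_instance

-- ===== CLAIM (what is proved, stated in full; the proofs are below) =====
def Claim_equal_detect_backbone_from_state_dict : Prop := ∀ (sd_keys : List String), Dom_detect_backbone_from_state_dict sd_keys → Spec_detect_backbone_from_state_dict sd_keys (detect_backbone_from_state_dict sd_keys)

-- ===== LEMMAS AND PROOFS =====
theorem pv_foldl_flags (l : List String) (a b c d : Bool) :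
    l.foldl
      (fun (f : Bool × Bool × Bool × Bool) k =>
        (f.1 || PySem.Str.isIn "deit.encoder" k || PySem.Str.isIn "transformer" k,
         f.2.1 || PySem.Str.isIn "features.denseblock" k,
         f.2.2.1 || PySem.Str.isIn "features.0.weight" k,
         f.2.2.2 || PySem.Str.isIn "classifier.6.weight" k))
      (a, b, c, d)
    = (a || l.any (fun k => PySem.Str.isIn "deit.encoder" k || PySem.Str.isIn "transformer" k),
       b || l.any (fun k => PySem.Str.isIn "features.denseblock" k),
       c || l.any (fun k => PySem.Str.isIn "features.0.weight" k),
       d || l.any (fun k => PySem.Str.isIn "classifier.6.weight" k)) := by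
  induction l generalizing a b c d with
  | nil => simp
  | cons x xs ih =>
    simp only [List.foldl_cons, ih, List.any_cons]
    simp [Bool.or_assoc]

-- ===== VERDICT (by name: the statement is the Claim_ definition above) =====
theorem detect_backbone_from_state_dict_spec : Claim_equal_detect_backbone_from_state_dict := by
  intro sd_keys _
  unfold Spec_detect_backbone_from_state_dict detect_backbone_from_state_dict detect_backbone_from_state_dict_alt
  simp only [pv_foldl_flags, Bool.false_or]
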